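-- pv_equiv track=rewrite | github.com/Md-Shaon-Khan/LeetCode | Biweekly Contest 166/maximize_alternating_sum_using_swaps.py | distinctPoints
-- ===== SOURCE A (Python) =====
-- def distinctPoints(s, k):
--     """
--     :type s: str
--     :type k: int
--     :rtype: int
--     """
--
--     brivandeko = (s, k)
--
--     n = len(s)
--
--     prefix_x = [0] * (n + 1)
--     prefix_y = [0] * (n + 1)
--
--     move = {'U': (0,1), 'D': (0,-1), 'L':(-1,0), 'R':(1,0)}
--
--     for i in range(n):
--         dx, dy = move[s[i]]
--         prefix_x[i+1] = prefix_x[i] + dx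
--         prefix_y[i+1] = prefix_y[i] + dy
--
--     distinct_points = set()
--
--
--     for i in range(n - k + 1):
--         x = prefix_x[i] + (prefix_x[n] - prefix_x[i+k])
--         y = prefix_y[i] + (prefix_y[n] - prefix_y[i+k])
--         distinct_points.add((x, y))
--
--     return len(distinct_points)
-- ===== SOURCE B (Python) =====
-- def distinctPoints(s, k):
--     """Rolling-window re-implementation: one total-displacement pass plus an O(1)-per-step sliding window (no prefix arrays)."""
--     move = {'U': (0, 1), 'D': (0, -1), 'L': (-1, 0), 'R': (1, 0)}
--     n = len(s)
--     if k > n: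
--         return 0
--     moves = [move[c] for c in s]
--     tx = sum(x for x, _ in moves)
--     ty = sum(y for _, y in moves)
--     wx = sum(x for x, _ in moves[:k])
--     wy = sum(y for _, y in moves[:k])
--     pts = {(tx - wx, ty - wy)}
--     for (ox, oy), (ix, iy) in zip(moves, moves[k:]):
--         wx += ix - ox
--         wy += iy - oy
--         pts.add((tx - wx, ty - wy))
--     return len(pts)
-- ===== Notes on version B (the rewrite author's own statement) =====
-- stated objective: alternative
-- what changed: B replaces A's two preallocated prefix-sum arrays and index arithmetic by a single pass computing the total displacement plus an O(1)-per-step rolling window displacement slid with zip(moves, moves[k:]).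
import Mathlib
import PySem

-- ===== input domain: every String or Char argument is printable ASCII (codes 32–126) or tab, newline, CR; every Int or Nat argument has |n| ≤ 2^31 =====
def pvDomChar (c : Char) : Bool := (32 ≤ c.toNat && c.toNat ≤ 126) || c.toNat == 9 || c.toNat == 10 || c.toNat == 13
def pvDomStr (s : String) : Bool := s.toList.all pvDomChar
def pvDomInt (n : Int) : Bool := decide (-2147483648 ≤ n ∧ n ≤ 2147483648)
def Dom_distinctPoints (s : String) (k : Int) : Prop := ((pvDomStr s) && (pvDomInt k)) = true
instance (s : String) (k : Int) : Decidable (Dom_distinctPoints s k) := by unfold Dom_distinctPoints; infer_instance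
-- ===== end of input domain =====

-- B replaces A's two prefix-sum arrays by a single rolling window displacement updated in O(1) per slide
-- (alternative decomposition, same O(n) cost); return values agree on Pre_ (valid move strings, k ≥ 0).

-- ===== PORT A =====
-- move[c]: the default (0, 0) branch is unreachable under Pre_ (Python raises KeyError there)
def pvMove (c : Char) : Int × Int :=
  if c = 'U' then (0, 1) else if c = 'D' then (0, -1)
  else if c = 'L' then (-1, 0) else if c = 'R' then (1, 0) else (0, 0)

def distinctPoints (s : String) (k : Int) : Int :=
  let cs := s.toList
  let n : Int := PySem.Str.len s
  -- prefix_x / prefix_y, filled left to right; ported as append-building with the running last value carried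
  let st := (PySem.List.pyRange 0 n).foldl
    (fun (st : List Int × List Int × Int × Int) i =>
      let d := pvMove (PySem.List.pyGetD cs i ' ')
      (st.1 ++ [st.2.2.1 + d.1], st.2.1 ++ [st.2.2.2 + d.2], st.2.2.1 + d.1, st.2.2.2 + d.2))
    ([0], [0], 0, 0)
  let px := st.1
  let py := st.2.1
  let pts := (PySem.List.pyRange 0 (n - k + 1)).foldl
    (fun (dp : PySem.Set (Int × Int)) i =>
      PySem.Set.add dp
        (PySem.List.pyGetD px i 0 + (PySem.List.pyGetD px n 0 - PySem.List.pyGetD px (i + k) 0),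
         PySem.List.pyGetD py i 0 + (PySem.List.pyGetD py n 0 - PySem.List.pyGetD py (i + k) 0)))
    PySem.Set.empty
  PySem.Set.len pts

-- ===== PORT B =====
def distinctPoints_alt (s : String) (k : Int) : Int :=
  let n : Int := PySem.Str.len s
  if k > n then 0 else
  let moves := s.toList.map pvMove
  let tx := (moves.map Prod.fst).sum
  let ty := (moves.map Prod.snd).sum
  let win := PySem.List.slice moves none (some k)
  let wx := (win.map Prod.fst).sum
  let wy := (win.map Prod.snd).sum
  let st := (moves.zip (PySem.List.slice moves (some k) none)).foldl
    (fun (st : Int × Int × PySem.Set (Int × Int)) pr =>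
      let wx := st.1 + (pr.2.1 - pr.1.1)
      let wy := st.2.1 + (pr.2.2 - pr.1.2)
      (wx, wy, PySem.Set.add st.2.2 (tx - wx, ty - wy)))
    (wx, wy, PySem.Set.ofList [(tx - wx, ty - wy)])
  PySem.Set.len st.2.2

-- ===== PRECONDITION & SPEC =====
-- Pre_ excludes exactly the inputs where Python A raises: a character outside 'UDLR' (KeyError in
-- move[s[i]]) or k < 0 (the second loop then reads prefix_x[i] for i up to n-k > n: IndexError).
def Pre_distinctPoints (s : String) (k : Int) : Prop :=
  (s.toList.all (fun c => c == 'U' || c == 'D' || c == 'L' || c == 'R')) = true ∧ 0 ≤ k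
instance (s : String) (k : Int) : Decidable (Pre_distinctPoints s k) := by
  unfold Pre_distinctPoints; infer_instance

def pvWitness_distinctPoints : String × Int := ("U", 1)

def Spec_distinctPoints (s : String) (k : Int) (out : Int) : Prop := out = distinctPoints_alt s k
instance (s : String) (k : Int) (out : Int) : Decidable (Spec_distinctPoints s k out) := by
  unfold Spec_distinctPoints; infer_instance

-- ===== CLAIM (what is proved, stated in full; the proofs are below) =====
def Claim_equal_distinctPoints : Prop := ∀ (s : String) (k : Int),
  Dom_distinctPoints s k → Pre_distinctPoints s k → Spec_distinctPoints s k (distinctPoints s k)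

-- ===== LEMMAS AND PROOFS =====

-- componentwise sums of a move list
def pvSx (l : List (Int × Int)) : Int := (l.map Prod.fst).sum
def pvSy (l : List (Int × Int)) : Int := (l.map Prod.snd).sum

-- the point recorded for window start j (both programs compute this value)
def pvPt (m : List (Int × Int)) (K j : Nat) : Int × Int :=
  (pvSx m - (pvSx (m.take (j + K)) - pvSx (m.take j)),
   pvSy m - (pvSy (m.take (j + K)) - pvSy (m.take j)))

-- the sequence of points B's sliding loop adds, as a recursive function of the zipped move pairs
def pvBPts (tx ty : Int) : Int → Int → List ((Int × Int) × (Int × Int)) → List (Int × Int)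
  | _, _, [] => []
  | wx, wy, pr :: t =>
      (tx - (wx + (pr.2.1 - pr.1.1)), ty - (wy + (pr.2.2 - pr.1.2))) ::
        pvBPts tx ty (wx + (pr.2.1 - pr.1.1)) (wy + (pr.2.2 - pr.1.2)) t

lemma pvSx_take_succ (m : List (Int × Int)) (t : Nat) (h : t < m.length) :
    pvSx (m.take (t + 1)) = pvSx (m.take t) + (m[t]).1 := by
  rw [pvSx, pvSx, List.map_take, List.map_take, List.sum_take_succ _ t (by simpa using h),
    List.getElem_map]

lemma pvSy_take_succ (m : List (Int × Int)) (t : Nat) (h : t < m.length) :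
    pvSy (m.take (t + 1)) = pvSy (m.take t) + (m[t]).2 := by
  rw [pvSy, pvSy, List.map_take, List.map_take, List.sum_take_succ _ t (by simpa using h),
    List.getElem_map]

-- appending one move extends the prefix-sum table by one entry (one component, f the projection)
lemma pvPrefix_snoc (f : (Int × Int) → Int) (m : List (Int × Int)) (d : Int × Int) :
    (List.range (m.length + 1)).map (fun t => ((m.take t).map f).sum) ++ [(m.map f).sum + f d]
    = (List.range (m.length + 1 + 1)).map (fun t => (((m ++ [d]).take t).map f).sum) := by
  symm
  rw [List.range_succ, List.map_append]
  congr 1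
  · refine List.map_congr_left ?_
    intro t ht
    rw [List.mem_range] at ht
    rw [List.take_append_of_le_length (by omega)]
  · simp [List.take_of_length_le]

-- A's prefix-building fold, characterised: the two arrays are the prefix sums, the carried pair the totals
lemma pvBuildA (cs : List Char) :
    cs.foldl
      (fun (st : List Int × List Int × Int × Int) c =>
        let d := pvMove c
        (st.1 ++ [st.2.2.1 + d.1], st.2.1 ++ [st.2.2.2 + d.2], st.2.2.1 + d.1, st.2.2.2 + d.2))
      ([0], [0], 0, 0)
    = ((List.range (cs.length + 1)).map (fun t => pvSx ((cs.map pvMove).take t)),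
       (List.range (cs.length + 1)).map (fun t => pvSy ((cs.map pvMove).take t)),
       pvSx (cs.map pvMove), pvSy (cs.map pvMove)) := by
  induction cs using List.reverseRecOn with
  | nil => simp [pvSx, pvSy]
  | append_singleton cs c ih =>
      rw [List.foldl_append, ih]
      simp only [List.foldl_cons, List.foldl_nil, List.length_append, List.length_singleton,
        List.map_append, List.map_singleton]
      have hlen : cs.length = (cs.map pvMove).length := by simp
      refine Prod.ext ?_ (Prod.ext ?_ (Prod.ext ?_ ?_))
      · simp only [pvSx, hlen]
        exact pvPrefix_snoc Prod.fst (cs.map pvMove) (pvMove c)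
      · simp only [pvSy, hlen]
        exact pvPrefix_snoc Prod.snd (cs.map pvMove) (pvMove c)
      · simp [pvSx]
      · simp [pvSy]

-- B's sliding fold, characterised: the final set is the start set updated with pvBPts
lemma pvFoldB (tx ty : Int) (l : List ((Int × Int) × (Int × Int))) :
    ∀ (wx wy : Int) (pts : PySem.Set (Int × Int)),
    (l.foldl
      (fun (st : Int × Int × PySem.Set (Int × Int)) pr =>
        (st.1 + (pr.2.1 - pr.1.1), st.2.1 + (pr.2.2 - pr.1.2),
         PySem.Set.add st.2.2 (tx - (st.1 + (pr.2.1 - pr.1.1)), ty - (st.2.1 + (pr.2.2 - pr.1.2)))))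
      (wx, wy, pts)).2.2
    = PySem.Set.update pts (pvBPts tx ty wx wy l) := by
  induction l with
  | nil => intro wx wy pts; simp [pvBPts]
  | cons pr t ih =>
      intro wx wy pts
      rw [List.foldl_cons, ih, pvBPts, PySem.Set.update_cons]

-- the window points B generates from position j are exactly the pvPt values for starts j+1, …
lemma pvBPts_zip (m : List (Int × Int)) (K : Nat) :
    ∀ (d j : Nat), m.length - (j + K) = d → j + K ≤ m.length →
    pvBPts (pvSx m) (pvSy m)
      (pvSx (m.take (j + K)) - pvSx (m.take j)) (pvSy (m.take (j + K)) - pvSy (m.take j))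
      ((m.drop j).zip (m.drop (j + K)))
    = (List.range d).map (fun t => pvPt m K (j + t + 1)) := by
  intro d
  induction d with
  | zero =>
      intro j h0 hle
      have : j + K = m.length := by omega
      simp [this, pvBPts]
  | succ d ih =>
      intro j h0 hle
      have hjk : j + K < m.length := by omega
      have hj : j < m.length := by omega
      rw [List.drop_eq_getElem_cons hj, List.drop_eq_getElem_cons hjk, List.zip_cons_cons, pvBPts]
      have hwx : pvSx (m.take (j + K)) - pvSx (m.take j) + ((m[j + K]).1 - (m[j]).1)
          = pvSx (m.take (j + K + 1)) - pvSx (m.take (j + 1)) := by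
        rw [pvSx_take_succ m (j + K) hjk, pvSx_take_succ m j hj]; ring
      have hwy : pvSy (m.take (j + K)) - pvSy (m.take j) + ((m[j + K]).2 - (m[j]).2)
          = pvSy (m.take (j + K + 1)) - pvSy (m.take (j + 1)) := by
        rw [pvSy_take_succ m (j + K) hjk, pvSy_take_succ m j hj]; ring
      rw [hwx, hwy]
      have htail := ih (j + 1) (by omega) (by omega)
      rw [Nat.add_right_comm j 1 K] at htail
      rw [htail, List.range_succ_eq_map, List.map_cons, List.map_map]
      congr 1
      · have e : j + 0 + 1 + K = j + K + 1 := by omega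
        have e' : j + 0 + 1 = j + 1 := by omega
        simp [pvPt, e]
      · refine List.map_congr_left ?_
        intro t _
        simp only [Function.comp]
        congr 1
        omega

-- A's whole computation, as the set of pvPt values (for 0 ≤ k ≤ n; K = k.toNat)
lemma pvA_eq (s : String) (k : Int) (hk : 0 ≤ k) (hkn : k.toNat ≤ s.toList.length) :
    distinctPoints s k
    = PySem.Set.len (PySem.Set.ofList
        ((List.range (s.toList.length - k.toNat + 1)).map
          (fun t => pvPt (s.toList.map pvMove) k.toNat t))) := by
  unfold distinctPoints
  simp only [PySem.Str.len_eq]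
  rw [PySem.List.foldl_pyRange_zero_pyGetD' s.toList ' '
    (fun (st : List Int × List Int × Int × Int) c =>
      let d := pvMove c
      (st.1 ++ [st.2.2.1 + d.1], st.2.1 ++ [st.2.2.2 + d.2], st.2.2.1 + d.1, st.2.2.2 + d.2))
    ([0], [0], 0, 0)]
  rw [pvBuildA]
  dsimp only
  rw [← PySem.Set.update_map_eq_foldl_add]
  rw [show (PySem.Set.empty : PySem.Set (Int × Int)) = [] from rfl, PySem.Set.update_nil_left]
  have hkK : k = (k.toNat : Int) := by omega
  have hb : ((s.toList.length : Int) - k + 1) = ((s.toList.length - k.toNat + 1 : Nat) : Int) := by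
    omega
  rw [hb, PySem.List.pyRange_one]
  have hbt : (((s.toList.length - k.toNat + 1 : Nat) : Int) - 0).toNat
      = s.toList.length - k.toNat + 1 := by omega
  rw [hbt, List.map_map]
  congr 1
  congr 1
  refine List.map_congr_left ?_
  intro t ht
  rw [List.mem_range] at ht
  simp only [Function.comp]
  have e0 : ((0 : Int) + (t : Int)) = ((t : Nat) : Int) := by omega
  have ek : ((t : Int) + k) = (((t + k.toNat : Nat)) : Int) := by omega
  rw [e0, ek, PySem.List.pyGetD_natCast, PySem.List.pyGetD_natCast, PySem.List.pyGetD_natCast,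
    PySem.List.pyGetD_natCast, PySem.List.pyGetD_natCast, PySem.List.pyGetD_natCast,
    PySem.List.getD_map_range _ _ _ _ (by omega), PySem.List.getD_map_range _ _ _ _ (by omega),
    PySem.List.getD_map_range _ _ _ _ (by omega), PySem.List.getD_map_range _ _ _ _ (by omega),
    PySem.List.getD_map_range _ _ _ _ (by omega), PySem.List.getD_map_range _ _ _ _ (by omega)]
  have htake : (s.toList.map pvMove).take s.toList.length = s.toList.map pvMove := by
    rw [show s.toList.length = (s.toList.map pvMove).length by simp, List.take_length]
  rw [htake]
  simp only [pvPt, Prod.mk.injEq]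
  constructor <;> ring

-- ===== VERDICT (by name: the statement is the Claim_ definition above) =====
theorem distinctPoints_spec : Claim_equal_distinctPoints := by
  intro s k _ hpre
  unfold Spec_distinctPoints
  obtain ⟨-, hk⟩ := hpre
  lift k to Nat using hk with K hkK
  have hsl : s.toList.length = s.length := by simp
  by_cases hkn : (K : Int) ≤ (s.toList.length : Int)
  · -- at least one window fits (possibly the empty one): both count the same point list
    rw [pvA_eq s K (by omega) (by simp; omega)]
    simp only [Int.toNat_natCast]
    unfold distinctPoints_alt
    simp only [PySem.Str.len_eq]
    rw [if_neg (by simp; omega)]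
    rw [PySem.List.slice_to_natCast, PySem.List.slice_from_natCast]
    rw [show (List.map Prod.fst (List.take K (List.map pvMove s.toList))).sum
          = pvSx ((List.map pvMove s.toList).take K) from rfl,
      show (List.map Prod.snd (List.take K (List.map pvMove s.toList))).sum
          = pvSy ((List.map pvMove s.toList).take K) from rfl,
      show (List.map Prod.fst (List.map pvMove s.toList)).sum
          = pvSx (List.map pvMove s.toList) from rfl,
      show (List.map Prod.snd (List.map pvMove s.toList)).sum
          = pvSy (List.map pvMove s.toList) from rfl]
    rw [pvFoldB]
    have hw0x : pvSx ((List.map pvMove s.toList).take K)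
        = pvSx ((List.map pvMove s.toList).take (0 + K))
          - pvSx ((List.map pvMove s.toList).take 0) := by
      simp [pvSx]
    have hw0y : pvSy ((List.map pvMove s.toList).take K)
        = pvSy ((List.map pvMove s.toList).take (0 + K))
          - pvSy ((List.map pvMove s.toList).take 0) := by
      simp [pvSy]
    have hzip : (List.map pvMove s.toList).zip ((List.map pvMove s.toList).drop K)
        = ((List.map pvMove s.toList).drop 0).zip ((List.map pvMove s.toList).drop (0 + K)) := by
      simp
    rw [hw0x, hw0y, hzip,
      pvBPts_zip (List.map pvMove s.toList) K ((List.map pvMove s.toList).length - (0 + K)) 0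
        rfl (by simp; omega)]
    rw [← PySem.Set.ofList_append, List.singleton_append]
    have hml : (List.map pvMove s.toList).length = s.toList.length := by simp
    rw [List.range_succ_eq_map, List.map_cons, List.map_map, hml]
    simp only [Nat.zero_add]
    refine congrArg PySem.Set.len (congrArg PySem.Set.ofList (congrArg₂ List.cons ?_ rfl))
    simp [pvPt, pvSx, pvSy]
  · -- k > n: A records no window, B returns 0
    unfold distinctPoints distinctPoints_alt
    simp only [PySem.Str.len_eq]
    rw [if_pos (by omega)]
    rw [PySem.List.pyRange_one_eq_nil
      (show ((s.toList.length : Int) - (K : Int) + 1) ≤ 0 from by omega)]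
    simp [PySem.Set.len, PySem.Set.empty]
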